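-- pv_equiv track=rewrite | github.com/AlexBugeac/Scripts | pdb_processing/forced_substitution_aligner.py | parse_pir
-- ===== SOURCE A (Python) =====
-- def parse_pir(text: str) -> list[dict]:
--     """Return list of {id, header, sequence} dicts preserving order."""
--     entries = []
--     current = None
--     for line in text.splitlines():
--         if line.startswith(">P1;"):
--             current = {"id": line[4:].strip(), "header": "", "sequence": ""}
--             entries.append(current)
--         elif current is not None:
--             if not current["header"] and (":" in line or line.strip() == ""):
--                 current["header"] = line
--             else:
--                 current["sequence"] += line.replace("*", "").strip()
--     return entries
-- ===== SOURCE B (Python) =====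
-- def parse_pir(text: str) -> list[dict]:
--     """Two-phase: split the lines into record blocks, then build each entry from its block."""
--     blocks = []
--     for line in text.splitlines():
--         if line.startswith(">P1;"):
--             blocks.append((line[4:].strip(), []))
--         elif blocks:
--             blocks[-1][1].append(line)
--     entries = []
--     for ident, body in blocks:
--         header = ""
--         parts = []
--         for line in body:
--             if not header and (":" in line or line.strip() == ""):
--                 header = line
--             else:
--                 parts.append(line.replace("*", "").strip())
--         entries.append({"id": ident, "header": header, "sequence": "".join(parts)})
--     return entries
-- ===== Notes on version B (the rewrite author's own statement) =====
-- stated objective: alternative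
-- what changed: A's single stateful loop that mutates the last-appended dict is replaced by a two-phase decomposition: first group the lines into record blocks at each '>P1;' marker, then build each entry independently from its block, collecting sequence pieces in a list and joining them once.
import Mathlib
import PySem

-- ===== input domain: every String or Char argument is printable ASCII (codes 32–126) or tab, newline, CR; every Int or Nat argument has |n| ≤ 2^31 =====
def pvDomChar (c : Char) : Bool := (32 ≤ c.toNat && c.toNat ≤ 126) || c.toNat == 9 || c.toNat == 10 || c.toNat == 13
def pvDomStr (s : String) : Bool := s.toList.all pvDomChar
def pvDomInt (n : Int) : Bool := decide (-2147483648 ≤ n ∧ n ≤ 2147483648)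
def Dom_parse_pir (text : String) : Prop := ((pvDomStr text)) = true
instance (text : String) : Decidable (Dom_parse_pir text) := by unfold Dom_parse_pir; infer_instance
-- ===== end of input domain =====

-- B re-decomposes A's single stateful loop into two phases (split lines into record blocks, then
-- build each entry from its block independently); same return value, objective: alternative.

-- ===== PORT A =====
-- state: the entries built so far, in REVERSE order; the head is Python's `current`
-- (after the first marker, `current` is always the last appended entry, so no Option is needed
-- beyond the empty-list case, which is exactly `current is None`).
def parseA_step (acc : List (List Char × List Char × List Char)) (line : List Char) :
    List (List Char × List Char × List Char) :=
  if PySem.Chars.startswith line ">P1;".toList then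
    (PySem.Chars.strip (PySem.List.slice line (some 4) none), [], []) :: acc
  else
    match acc with
    | [] => acc
    | (i, h, s) :: rest =>
      if (h == []) && (PySem.Chars.isIn ":".toList line || PySem.Chars.strip line == []) then
        (i, line, s) :: rest
      else
        (i, h, s ++ PySem.Chars.strip (PySem.Chars.replace line "*".toList [])) :: rest

def parse_pir (text : String) : List (List (String × String)) :=
  (((PySem.Chars.splitlines text.toList).foldl parseA_step []).reverse).map
    (fun e => [("id", String.ofList e.1), ("header", String.ofList e.2.1), ("sequence", String.ofList e.2.2)])

-- ===== PORT B =====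
-- phase 1: blocks, in REVERSE order; each block is (id, body lines in order)
def blocksStep (bs : List (List Char × List (List Char))) (line : List Char) :
    List (List Char × List (List Char)) :=
  if PySem.Chars.startswith line ">P1;".toList then
    (PySem.Chars.strip (PySem.List.slice line (some 4) none), []) :: bs
  else
    match bs with
    | [] => bs
    | (i, body) :: rest => (i, body ++ [line]) :: rest

-- phase 2: per-block fold maintaining (header, sequence parts)
def innerStep (st : List Char × List (List Char)) (line : List Char) :
    List Char × List (List Char) :=
  if (st.1 == []) && (PySem.Chars.isIn ":".toList line || PySem.Chars.strip line == []) then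
    (line, st.2)
  else
    (st.1, st.2 ++ [PySem.Chars.strip (PySem.Chars.replace line "*".toList [])])

def processBlock (b : List Char × List (List Char)) : List (String × String) :=
  let hp := b.2.foldl innerStep ([], [])
  [("id", String.ofList b.1), ("header", String.ofList hp.1),
   ("sequence", String.ofList (PySem.Chars.join [] hp.2))]

def parse_pir_alt (text : String) : List (List (String × String)) :=
  (((PySem.Chars.splitlines text.toList).foldl blocksStep []).reverse).map processBlock

-- ===== PRECONDITION & SPEC =====
def Spec_parse_pir (text : String) (out : List (List (String × String))) : Prop := out = parse_pir_alt text
instance (text : String) (out : List (List (String × String))) : Decidable (Spec_parse_pir text out) := by unfold Spec_parse_pir; infer_instance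

-- ===== CLAIM (what is proved, stated in full; the proofs are below) =====
def Claim_equal_parse_pir : Prop := ∀ (text : String), Dom_parse_pir text → Spec_parse_pir text (parse_pir text)

-- ===== LEMMAS AND PROOFS =====

-- abstraction: a B block determines the A entry triple
def pvAbs (b : List Char × List (List Char)) : List Char × List Char × List Char :=
  (b.1, (b.2.foldl innerStep ([], [])).1,
    PySem.Chars.join [] (b.2.foldl innerStep ([], [])).2)

lemma join_nil_append (ps : List (List Char)) (x : List Char) :
    PySem.Chars.join [] (ps ++ [x]) = PySem.Chars.join [] ps ++ x := by
  induction ps with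
  | nil => simp [PySem.Chars.join_nil, PySem.Chars.join_singleton]
  | cons a ps ih =>
    cases ps with
    | nil =>
      have h1 : ([a] ++ [x] : List (List Char)) = a :: [x] := rfl
      rw [h1, PySem.Chars.join_cons_cons, PySem.Chars.join_singleton,
        PySem.Chars.join_singleton]
      simp
    | cons b rest =>
      have h1 : ((a :: b :: rest) ++ [x] : List (List Char)) = a :: ((b :: rest) ++ [x]) := rfl
      have h2 : ((b :: rest) ++ [x] : List (List Char)) = b :: (rest ++ [x]) := rfl
      rw [h1, h2, PySem.Chars.join_cons_cons]
      have ih' := ih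
      rw [h2] at ih'
      rw [ih', PySem.Chars.join_cons_cons]
      simp

lemma step_comm (bs : List (List Char × List (List Char))) (line : List Char) :
    parseA_step (bs.map pvAbs) line = (blocksStep bs line).map pvAbs := by
  unfold parseA_step blocksStep
  cases hm : PySem.Chars.startswith line ">P1;".toList with
  | true => simp [pvAbs, PySem.Chars.join_nil]
  | false =>
    cases bs with
    | nil => rfl
    | cons b rest =>
      obtain ⟨i, body⟩ := b
      rcases hb : body.foldl innerStep ([], []) with ⟨h, p⟩
      have habs : pvAbs (i, body) = (i, h, PySem.Chars.join [] p) := by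
        unfold pvAbs; rw [hb]
      rw [List.map_cons, habs]
      dsimp only
      cases hc : (h == []) && (PySem.Chars.isIn ":".toList line
          || PySem.Chars.strip line == []) with
      | true =>
        have habs2 : pvAbs (i, body ++ [line]) = (i, line, PySem.Chars.join [] p) := by
          unfold pvAbs
          rw [List.foldl_append, hb, List.foldl_cons, List.foldl_nil]
          unfold innerStep
          dsimp only
          rw [hc]
          rfl
        simp [habs2]
      | false =>
        have habs2 : pvAbs (i, body ++ [line]) =
            (i, h, PySem.Chars.join [] p
              ++ PySem.Chars.strip (PySem.Chars.replace line "*".toList [])) := by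
          unfold pvAbs
          rw [List.foldl_append, hb, List.foldl_cons, List.foldl_nil]
          unfold innerStep
          dsimp only
          rw [hc]
          rw [show (if false = true then ((line : List Char), p) else (h, p ++ [PySem.Chars.strip (PySem.Chars.replace line "*".toList [])])) = (h, p ++ [PySem.Chars.strip (PySem.Chars.replace line "*".toList [])]) from rfl]
          rw [join_nil_append]
        simp [habs2]

lemma fold_comm (lines : List (List Char)) (bs : List (List Char × List (List Char))) :
    lines.foldl parseA_step (bs.map pvAbs) = (lines.foldl blocksStep bs).map pvAbs := by
  induction lines generalizing bs with
  | nil => rfl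
  | cons l ls ih => rw [List.foldl_cons, List.foldl_cons, step_comm, ih]

-- ===== VERDICT (by name: the statement is the Claim_ definition above) =====
theorem parse_pir_spec : Claim_equal_parse_pir := by
  intro text _
  unfold Spec_parse_pir parse_pir parse_pir_alt
  have hfc := fold_comm (PySem.Chars.splitlines text.toList) []
  rw [List.map_nil] at hfc
  rw [hfc, List.map_reverse, List.map_reverse, List.map_map]
  rfl
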